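-- pv_equiv track=rewrite | github.com/mborrero083/mirepositorio | todas_las_pruebas/pruebas_Python/miprimermodulo.py | indices_letra
-- ===== SOURCE A (Python) =====
-- def indices_letra(palabra):
--     indices=[]
--     indice=0
--     for letra in palabra:
--         if palabra.count(letra)>1:
--             indice=palabra.index(letra,indice)
--             indices.append(indice)
--             indice=indice+1
--     return(indices)
-- ===== SOURCE B (Python) =====
-- def indices_letra(palabra):
--     pos = {}
--     for i, c in enumerate(palabra):
--         pos.setdefault(c, []).append(i)
--     res = []
--     for lst in pos.values():
--         if len(lst) > 1:
--             res.extend(lst)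
--     return sorted(res)
-- ===== Notes on version B (the rewrite author's own statement) =====
-- stated objective: faster
-- what changed: Replaced A's per-character palabra.count/palabra.index rescans (quadratic) by one grouping pass into a dict of per-character position lists, then emitting the groups of size > 1 and sorting the positions.
import Mathlib
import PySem

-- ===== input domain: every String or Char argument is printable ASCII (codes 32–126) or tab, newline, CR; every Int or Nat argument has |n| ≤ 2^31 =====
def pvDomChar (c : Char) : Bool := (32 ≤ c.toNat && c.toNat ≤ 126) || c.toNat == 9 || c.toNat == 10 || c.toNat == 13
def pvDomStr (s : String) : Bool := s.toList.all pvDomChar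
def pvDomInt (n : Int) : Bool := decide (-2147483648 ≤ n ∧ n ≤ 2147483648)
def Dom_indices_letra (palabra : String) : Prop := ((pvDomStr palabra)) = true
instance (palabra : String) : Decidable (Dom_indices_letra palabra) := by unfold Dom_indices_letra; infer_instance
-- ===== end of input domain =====

-- B replaces A's per-character count/index rescans by one grouping pass into a dict of
-- position lists, then emits the groups of size > 1 and sorts; same return value, different algorithm.

-- ===== PORT A =====
def indices_letra (palabra : String) : List Int :=
  (palabra.toList.foldl
    (fun (st : List Int × Int) (letra : Char) =>
      if 1 < PySem.Str.count palabra (String.singleton letra) then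
        let indice := PySem.Str.findFrom palabra (String.singleton letra) st.2
        (st.1 ++ [indice], indice + 1)
      else st)
    ([], 0)).1

-- ===== PORT B =====
def indices_letra_alt (palabra : String) : List Int :=
  let pos := (PySem.List.enumerate palabra.toList 0).foldl
    (fun d p => d.modify p.2 [] (fun v => v ++ [p.1]))
    (PySem.Dict.empty : PySem.Dict Char (List Int))
  let res := pos.values.foldl
    (fun acc lst => if 1 < lst.length then acc ++ lst else acc) ([] : List Int)
  PySem.List.sorted res (fun x => x) false

-- ===== PRECONDITION & SPEC =====
def Spec_indices_letra (palabra : String) (out : List Int) : Prop := out = indices_letra_alt palabra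
instance (palabra : String) (out : List Int) : Decidable (Spec_indices_letra palabra out) := by unfold Spec_indices_letra; infer_instance

-- ===== CLAIM (what is proved, stated in full; the proofs are below) =====
def Claim_equal_indices_letra : Prop := ∀ (palabra : String), Dom_indices_letra palabra → Spec_indices_letra palabra (indices_letra palabra)

-- ===== LEMMAS AND PROOFS =====

-- the common value both ports compute: the ascending indices of duplicated characters
def pvTarget (s : List Char) : List Int :=
  ((PySem.List.enumerate s 0).filter (fun p => decide (1 < s.count p.2))).map (·.1)

-- counting a one-character substring is counting the character
lemma count_go_singleton (c : Char) (l : List Char) : ∀ (fuel acc : Nat), l.length ≤ fuel →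
    PySem.Chars.count.go [c] fuel l acc = acc + l.count c := by
  induction l with
  | nil => intro fuel acc _; cases fuel <;> simp [PySem.Chars.count.go]
  | cons x t ih =>
    intro fuel acc h
    cases fuel with
    | zero => simp at h
    | succ f =>
      have hf : t.length ≤ f := by simpa using h
      by_cases hx : x = c
      · subst hx
        simp [PySem.Chars.count.go, List.isPrefixOf, ih f (acc + 1) hf]
        omega
      · simp [PySem.Chars.count.go, List.isPrefixOf, hx, ih f acc hf, Ne.symm hx]

lemma count_singleton (s : List Char) (c : Char) :
    PySem.Chars.count s [c] = s.count c := by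
  simp [PySem.Chars.count, count_go_singleton c s s.length 0 le_rfl]

lemma singleton_prefix_iff (c : Char) (l : List Char) : [c] <+: l ↔ l.head? = some c := by
  cases l with
  | nil => simp
  | cons x t => simp [List.cons_prefix_cons, eq_comm]

lemma findFrom_singleton (s : List Char) (c : Char) (k i : Nat)
    (hi : i < s.length) (hk : k ≤ i) (hc : s[i] = c)
    (hno : ∀ j (hj : j < s.length), k ≤ j → j < i → s[j] ≠ c) :
    PySem.Chars.findFrom s [c] (k : Int) = (i : Int) := by
  have hk' : k ≤ s.length := le_of_lt (lt_of_le_of_lt hk hi)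
  rw [PySem.Chars.findFrom_natCast s [c] k hk']
  have hdropik : (s.drop k).drop (i - k) = s.drop i := by
    rw [List.drop_drop]; congr 1; omega
  have hpre : [c] <+: (s.drop k).drop (i - k) := by
    rw [hdropik, singleton_prefix_iff, List.head?_drop]
    simp [List.getElem?_eq_getElem hi, hc]
  have hinf : [c] <:+: s.drop k := by
    obtain ⟨r, hr⟩ := hpre
    exact ⟨(s.drop k).take (i - k), r, by rw [List.append_assoc, hr, List.take_append_drop]⟩
  have h0 : 0 ≤ PySem.Chars.find (s.drop k) [c] :=
    (PySem.Chars.find_nonneg_iff _ _).mpr hinf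
  obtain ⟨hp, hmin⟩ := PySem.Chars.find_spec h0
  set m := (PySem.Chars.find (s.drop k) [c]).toNat with hm
  have hmik : m = i - k := by
    have h1 : ¬ (i - k) < m := by
      intro hlt
      exact hmin (i - k) hlt hpre
    have h2 : ¬ m < i - k := by
      intro hlt
      rw [singleton_prefix_iff, List.head?_drop, List.getElem?_drop] at hp
      -- hp : s[k + m]? = some c with k + m < i
      have hlt2 : k + m < s.length := by
        by_contra hge
        rw [List.getElem?_eq_none (by omega)] at hp
        simp at hp
      rw [List.getElem?_eq_getElem hlt2] at hp
      exact hno (k + m) hlt2 (by omega) (by omega) (Option.some.injEq _ _ ▸ hp)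
    omega
  have : PySem.Chars.find (s.drop k) [c] = ((i - k : Nat) : Int) := by
    rw [← hmik, hm, Int.toNat_of_nonneg h0]
  rw [this]
  have : ¬ ((i - k : Nat) : Int) = -1 := by omega
  simp only [if_neg this]
  omega

-- the loop of A, from position i on, appends exactly the duplicated positions ≥ i
lemma loopA (palabra : String) : ∀ (m i : Nat), i + m = palabra.toList.length →
    ∀ (acc : List Int) (k : Nat), k ≤ i →
    (∀ j (hj : j < palabra.toList.length), k ≤ j → j < i → palabra.toList.count (palabra.toList[j]) ≤ 1) →
    (((palabra.toList.drop i).foldl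
      (fun (st : List Int × Int) (letra : Char) =>
        if 1 < PySem.Str.count palabra (String.singleton letra) then
          let indice := PySem.Str.findFrom palabra (String.singleton letra) st.2
          (st.1 ++ [indice], indice + 1)
        else st)
      (acc, (k : Int))).1)
    = acc ++ ((PySem.List.enumerate (palabra.toList.drop i) (i : Int)).filter
        (fun p => decide (1 < palabra.toList.count p.2))).map (·.1) := by
  intro m
  induction m with
  | zero =>
    intro i hlen acc k _ _
    rw [List.drop_of_length_le (by omega)]
    simp [PySem.List.enumerate]
  | succ m ih =>
    intro i hlen acc k hki hinv
    set s := palabra.toList with hs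
    have hi : i < s.length := by omega
    rw [List.drop_eq_getElem_cons hi, List.foldl_cons, PySem.List.enumerate_cons]
    have hcnt : PySem.Str.count palabra (String.singleton s[i]) = s.count s[i] := by
      rw [PySem.Str.count_eq]
      simp [← hs, count_singleton]
    by_cases hdup : 1 < s.count s[i]
    · have hff : PySem.Str.findFrom palabra (String.singleton s[i]) ((k : Nat) : Int) = (i : Int) := by
        rw [PySem.Str.findFrom_eq]
        simp only [String.toList_singleton, ← hs]
        exact findFrom_singleton s s[i] k i hi hki rfl
          (fun j hj hkj hji hEq => absurd (hEq ▸ hinv j hj hkj hji) (by omega))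
      simp only [hcnt, hdup, if_pos, hff]
      have := ih (i + 1) (by omega) (acc ++ [(i : Int)]) (i + 1) le_rfl
        (fun j hj h1 h2 => by omega)
      rw [show (((i + 1 : Nat)) : Int) = ((i : Int) + 1) by push_cast; ring] at this
      rw [this]
      simp [hdup, List.append_assoc]
    · simp only [hcnt, hdup, if_neg, not_false_iff]
      have := ih (i + 1) (by omega) acc k (by omega)
        (fun j hj h1 h2 => by
          by_cases hji : j < i
          · exact hinv j hj h1 hji
          · have : j = i := by omega
            subst this; omega)
      rw [show (((i + 1 : Nat)) : Int) = ((i : Int) + 1) by push_cast; ring] at this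
      rw [this]
      simp [hdup]

lemma indices_letra_eq_target (palabra : String) :
    indices_letra palabra = pvTarget palabra.toList := by
  unfold indices_letra pvTarget
  have := loopA palabra palabra.toList.length 0 (by omega) [] 0 le_rfl (by omega)
  simpa using this

-- ===== B side =====

lemma getD_groups (l : List (Int × Char)) (d : PySem.Dict Char (List Int)) (c : Char) :
    ((l.foldl (fun d p => d.modify p.2 [] (fun v => v ++ [p.1])) d).getD c [])
      = d.getD c [] ++ (l.filter (fun p => p.2 == c)).map (·.1) := by
  induction l generalizing d with
  | nil => simp
  | cons p t ih =>
    rw [List.foldl_cons, ih]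
    by_cases hp : p.2 = c
    · subst hp
      rw [PySem.Dict.getD_modify_self]
      simp
    · rw [PySem.Dict.getD_modify_of_ne _ _ _ (Ne.symm hp)]
      simp [hp]

lemma foldl_extend_if :
    ∀ (l : List (List Int)) (a : List Int),
    (l.foldl (fun acc lst => if 1 < lst.length then acc ++ lst else acc) a)
      = a ++ (l.filter (fun lst => decide (1 < lst.length))).flatten := by
  intro l
  induction l with
  | nil => intro a; simp
  | cons x t ih =>
    intro a
    by_cases h : 1 < x.length
    · simp [h, ih, List.append_assoc]
    · simp [h, ih]

lemma flat_groups_perm {α χ : Type} [DecidableEq χ] (key : α → χ) :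
    ∀ (chars : List χ) (E : List α), chars.Nodup → (∀ p ∈ E, key p ∈ chars) →
    (chars.flatMap (fun c => E.filter (fun p => key p == c))).Perm E := by
  intro chars
  induction chars with
  | nil =>
    intro E _ hall
    cases E with
    | nil => simp
    | cons x t => exact absurd (hall x (by simp)) (by simp)
  | cons c cs ih =>
    intro E hnd hall
    rw [List.flatMap_cons]
    have hcs : c ∉ cs := (List.nodup_cons.mp hnd).1
    have hsame : ∀ c' ∈ cs, E.filter (fun p => key p == c')
        = (E.filter (fun p => !(key p == c))).filter (fun p => key p == c') := by
      intro c' hc'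
      rw [List.filter_filter]
      apply List.filter_congr
      intro p _
      by_cases h : key p = c'
      · have hne : ¬ c' = c := fun hq => hcs (hq ▸ hc')
        simp [h, hne]
      · simp [h]
    have hmap : cs.flatMap (fun c' => E.filter (fun p => key p == c'))
        = cs.flatMap (fun c' => (E.filter (fun p => !(key p == c))).filter (fun p => key p == c')) := by
      rw [List.flatMap_def, List.flatMap_def, List.map_congr_left hsame]
    rw [hmap]
    have hperm₂ : (cs.flatMap (fun c' => (E.filter (fun p => !(key p == c))).filter
        (fun p => key p == c'))).Perm (E.filter (fun p => !(key p == c))) := by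
      apply ih _ (List.nodup_cons.mp hnd).2
      intro p hp
      obtain ⟨hpE, hpc⟩ := List.mem_filter.mp hp
      have := hall p hpE
      simp only [List.mem_cons] at this
      rcases this with h | h
      · simp [h] at hpc
      · exact h
    exact List.Perm.trans (List.Perm.append_left _ hperm₂) (List.filter_append_perm _ _)

lemma alt_eq_target (palabra : String) :
    indices_letra_alt palabra = pvTarget palabra.toList := by
  unfold indices_letra_alt
  dsimp only
  set s := palabra.toList with hs
  set E := PySem.List.enumerate s 0 with hE
  set pos := E.foldl (fun d p => d.modify p.2 [] (fun v => v ++ [p.1]))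
    (PySem.Dict.empty : PySem.Dict Char (List Int)) with hpos
  have hkeys : pos.keys = PySem.Set.ofList s := by
    rw [hpos, PySem.Dict.keys_foldl_modify_key E (fun p => p.2) [] (fun _ p => (fun v => v ++ [p.1])),
      PySem.Dict.keys_empty, PySem.List.map_snd_enumerate]
    rw [PySem.Set.ofList_eq_foldl]
    rfl
  have hnd : pos.keys.Nodup := by
    rw [hkeys]; exact PySem.Set.nodup_ofList s
  have hgetD : ∀ c, pos.getD c [] = (E.filter (fun p => p.2 == c)).map (·.1) := by
    intro c
    rw [hpos, getD_groups, PySem.Dict.getD_empty]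
    simp
  have hvals : pos.values = (PySem.Set.ofList s).map
      (fun c => (E.filter (fun p => p.2 == c)).map (·.1)) := by
    rw [PySem.Dict.values_eq_map_keys pos hnd [], hkeys]
    exact List.map_congr_left (fun c _ => hgetD c)
  have hlenc : ∀ c : Char, ((E.filter (fun p => p.2 == c)).map (·.1)).length = s.count c := by
    intro c
    rw [List.length_map, ← List.countP_eq_length_filter]
    conv_rhs => rw [show s.count c = (E.map (fun p => p.2)).count c by rw [PySem.List.map_snd_enumerate]]
    rw [List.count_eq_countP, List.countP_map]
    rfl
  rw [foldl_extend_if, hvals, List.filter_map, List.nil_append, ← List.flatMap_def]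
  have hQ : (PySem.Set.ofList s).filter
        ((fun lst => decide (1 < lst.length)) ∘ (fun c => (E.filter (fun p => p.2 == c)).map (·.1)))
      = (PySem.Set.ofList s).filter (fun c => decide (1 < s.count c)) := by
    apply List.filter_congr
    intro c _
    simp [hlenc c]
  rw [hQ]
  set E' := E.filter (fun p => decide (1 < s.count p.2)) with hE'
  have hswap : ((PySem.Set.ofList s).filter (fun c => decide (1 < s.count c))).flatMap
        (fun c => (E.filter (fun p => p.2 == c)).map (·.1))
      = ((PySem.Set.ofList s).filter (fun c => decide (1 < s.count c))).flatMap
        (fun c => (E'.filter (fun p => p.2 == c)).map (·.1)) := by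
    rw [List.flatMap_def, List.flatMap_def]
    congr 1
    apply List.map_congr_left
    intro c hc
    have hQc : 1 < s.count c := by
      have := (List.mem_filter.mp hc).2
      simpa using this
    congr 1
    rw [hE', List.filter_filter]
    apply List.filter_congr
    intro p _
    by_cases h : p.2 = c
    · simp [h, hQc]
    · simp [h]
  rw [hswap]
  have hperm : (((PySem.Set.ofList s).filter (fun c => decide (1 < s.count c))).flatMap
      (fun c => (E'.filter (fun p => p.2 == c)).map (·.1))).Perm (pvTarget s) := by
    have hbase := flat_groups_perm (fun p : Int × Char => p.2)
      ((PySem.Set.ofList s).filter (fun c => decide (1 < s.count c))) E'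
      ((PySem.Set.nodup_ofList s).filter _)
      (by
        intro p hp
        obtain ⟨hpE, hpc⟩ := List.mem_filter.mp hp
        apply List.mem_filter.mpr
        refine ⟨?_, hpc⟩
        rw [PySem.Set.mem_ofList]
        obtain ⟨k, hk, rfl⟩ := (PySem.List.mem_enumerate_iff s 0 p).mp hpE
        exact List.getElem_mem hk)
    have := hbase.map (·.1)
    rw [List.map_flatMap] at this
    exact this
  have hpair : (pvTarget s).Pairwise (fun a b => a < b) := by
    unfold pvTarget
    rw [List.pairwise_map]
    exact (PySem.List.pairwise_lt_enumerate s 0).filter _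
  exact PySem.List.sorted_eq_of_perm_of_pairwise_lt _ _ _ hperm.symm hpair

-- ===== VERDICT (by name: the statement is the Claim_ definition above) =====
theorem indices_letra_spec : Claim_equal_indices_letra := by
  intro palabra _
  unfold Spec_indices_letra
  rw [indices_letra_eq_target, alt_eq_target]
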